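-- pv_equiv track=rewrite | github.com/ghdic/CodingProblemSolving | programmers/시험장 나누기.py | search
-- ===== SOURCE A (Python) =====
-- def search(node, target, num, links, memo):
--     """DFS 기반으로 트래픽을 그룹으로 나누며, 메모이제이션 적용"""
--     if node == -1:
--         return 0, 0
--
--     if node in memo:  # 메모이제이션 활용하여 중복 연산 방지
--         return memo[node]
--
--     left, right = links[node]
--     left_cnt, left_val = search(left, target, num, links, memo)
--     right_cnt, right_val = search(right, target, num, links, memo)
--     tot_cnt = left_cnt + right_cnt
--     result_sum = left_val + right_val + num[node]
--
--     if result_sum <= target: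
--         memo[node] = (tot_cnt, result_sum)
--         return memo[node]
--
--     if min(left_val, right_val) + num[node] <= target:
--         memo[node] = (tot_cnt + 1, min(left_val, right_val) + num[node])
--         return memo[node]
--
--     memo[node] = (tot_cnt + 2, num[node])
--     return memo[node]
-- ===== SOURCE B (Python) =====
-- def search(node, target, num, links, memo):
--     """Iterative post-order traversal with an explicit stack instead of
--     recursion; same memoization and threshold cascade as the recursive DFS."""
--     if node == -1:
--         return 0, 0
--     if node in memo:
--         return memo[node]
--     stack = [(node, False)]
--     while stack:
--         cur, ready = stack.pop()
--         if cur == -1 or cur in memo: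
--             continue
--         left, right = links[cur]
--         if ready:
--             lc, lv = (0, 0) if left == -1 else memo[left]
--             rc, rv = (0, 0) if right == -1 else memo[right]
--             s = lv + rv + num[cur]
--             if s <= target:
--                 memo[cur] = (lc + rc, s)
--             elif min(lv, rv) + num[cur] <= target:
--                 memo[cur] = (lc + rc + 1, min(lv, rv) + num[cur])
--             else:
--                 memo[cur] = (lc + rc + 2, num[cur])
--         else:
--             stack.append((cur, True))
--             stack.append((right, False))
--             stack.append((left, False))
--     return memo[node]
-- ===== Notes on version B (the rewrite author's own statement) =====
-- stated objective: alternative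
-- what changed: A's memoized recursive DFS is replaced by an iterative post-order traversal with an explicit stack of (node, ready) frames; a node is combined (same threshold cascade, same memo entries) only after both children were resolved, with no recursion and no call stack.
import Mathlib
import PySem

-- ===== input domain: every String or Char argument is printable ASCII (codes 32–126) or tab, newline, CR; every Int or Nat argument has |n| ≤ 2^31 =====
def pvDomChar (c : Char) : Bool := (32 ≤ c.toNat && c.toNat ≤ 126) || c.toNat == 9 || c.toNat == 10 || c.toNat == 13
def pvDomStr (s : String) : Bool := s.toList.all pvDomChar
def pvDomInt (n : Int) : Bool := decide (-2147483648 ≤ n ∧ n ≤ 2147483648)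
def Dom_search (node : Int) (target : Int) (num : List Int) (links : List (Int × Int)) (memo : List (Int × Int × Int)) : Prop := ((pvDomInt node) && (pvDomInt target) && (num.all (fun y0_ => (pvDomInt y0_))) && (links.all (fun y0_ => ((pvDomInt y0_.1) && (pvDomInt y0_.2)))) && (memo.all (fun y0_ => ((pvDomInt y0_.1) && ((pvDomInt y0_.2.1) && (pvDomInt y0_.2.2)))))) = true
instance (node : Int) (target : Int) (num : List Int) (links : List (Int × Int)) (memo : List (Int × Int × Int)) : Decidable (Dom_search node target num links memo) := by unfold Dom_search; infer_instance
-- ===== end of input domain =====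

-- B replaces A's memoized recursive DFS by an iterative post-order traversal with an explicit
-- stack (alternative decomposition, no speed claim). Both Pythons mutate `memo` identically;
-- the equivalence proved here is about the RETURN value.

-- the threshold cascade shared verbatim by both Python sources
def pvCombine (target : Int) (lp rp : Int × Int) (nv : Int) : Int × Int :=
  let result_sum := lp.2 + rp.2 + nv
  if result_sum ≤ target then (lp.1 + rp.1, result_sum)
  else if min lp.2 rp.2 + nv ≤ target then (lp.1 + rp.1 + 1, min lp.2 rp.2 + nv)
  else (lp.1 + rp.1 + 2, nv)

-- ===== PORT A =====
-- recursive DFS threading the mutated memo dict; the fuel only makes the recursion total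
-- (2*links.length + 2 suffices under Pre_search; the 0-fuel branch is unreachable there)
def searchRec (target : Int) (num : List Int) (links : List (Int × Int)) :
    Nat → Int → PySem.Dict Int (Int × Int) → ((Int × Int) × PySem.Dict Int (Int × Int))
  | 0, _, m => ((0, 0), m)
  | Nat.succ fuel, node, m =>
    if node = -1 then ((0, 0), m)
    else
      match PySem.Dict.get? m node with
      | some v => (v, m)
      | none =>
        match PySem.List.pyGet? links node with
        | none => ((0, 0), m)          -- Python IndexError; outside Pre_search
        | some lr =>
          let L := searchRec target num links fuel lr.1 m
          let R := searchRec target num links fuel lr.2 L.2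
          match PySem.List.pyGet? num node with
          | none => ((0, 0), R.2)      -- Python IndexError; outside Pre_search
          | some nv =>
            let v := pvCombine target L.1 R.1 nv
            (v, PySem.Dict.insert R.2 node v)

def search (node : Int) (target : Int) (num : List Int) (links : List (Int × Int)) (memo : List (Int × Int × Int)) : Int × Int :=
  (searchRec target num links (2 * links.length + 2) node (PySem.Dict.mk memo)).1

-- ===== PORT B =====
-- B's while loop over the explicit stack of (node, ready) frames; the fuel only makes the
-- loop total (2^(2*links.length+3) iterations suffice under Pre_search)
def loopB (target : Int) (num : List Int) (links : List (Int × Int)) :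
    Nat → List (Int × Bool) → PySem.Dict Int (Int × Int) → PySem.Dict Int (Int × Int)
  | 0, _, m => m
  | Nat.succ _, [], m => m
  | Nat.succ f, (cur, ready) :: rest, m =>
    if cur = -1 then loopB target num links f rest m
    else
      match PySem.Dict.get? m cur with
      | some _ => loopB target num links f rest m            -- `continue`
      | none =>
        match PySem.List.pyGet? links cur with
        | none => loopB target num links f rest m            -- Python IndexError; outside Pre_search
        | some lr =>
          if ready then
            -- memo[left]/memo[right]: present under Pre_search, so the getD defaults are
            -- unreachable there (Python would raise KeyError)
            let lp := if lr.1 = -1 then ((0 : Int), (0 : Int)) else (PySem.Dict.get? m lr.1).getD (0, 0)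
            let rp := if lr.2 = -1 then ((0 : Int), (0 : Int)) else (PySem.Dict.get? m lr.2).getD (0, 0)
            let nv := (PySem.List.pyGet? num cur).getD 0     -- in range under Pre_search
            loopB target num links f rest (PySem.Dict.insert m cur (pvCombine target lp rp nv))
          else
            loopB target num links f ((lr.1, false) :: (lr.2, false) :: (cur, true) :: rest) m

def search_alt (node : Int) (target : Int) (num : List Int) (links : List (Int × Int)) (memo : List (Int × Int × Int)) : Int × Int :=
  if node = -1 then (0, 0)
  else
    let d := PySem.Dict.mk memo
    match PySem.Dict.get? d node with
    | some v => v
    | none =>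
      let final := loopB target num links (2 ^ (2 * links.length + 3)) [(node, false)] d
      (PySem.Dict.get? final node).getD (0, 0)               -- memo[node]: present under Pre_search

-- ===== PRECONDITION & SPEC =====
-- `i` is resolvable within depth h: it is the -1 leaf marker, already memoised, or a valid
-- index (Python indexing, so negative wraparound counts) of links and num both of whose
-- children are resolvable within depth h-1
def pvRes (links : List (Int × Int)) (num : List Int) (memo0 : PySem.Dict Int (Int × Int)) : Nat → Int → Bool
  | 0, _ => false
  | Nat.succ h, i =>
    if i = -1 then true
    else if (PySem.Dict.get? memo0 i).isSome then true
    else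
      match PySem.List.pyGet? links i, PySem.List.pyGet? num i with
      | some lr, some _ => pvRes links num memo0 h lr.1 && pvRes links num memo0 h lr.2
      | _, _ => false

-- Pre_search holds exactly when A's recursion terminates: the part of the links graph reachable
-- from node without passing through -1 or a memoised key is in range and well-founded (depth
-- 2*links.length+1 bounds every repeat-free chain of valid Python indices).  The excluded inputs
-- are exactly those on which A raises (IndexError on an out-of-range index, RecursionError on a
-- reachable cycle); A returns no value outside Pre_search.
def Pre_search (node : Int) (target : Int) (num : List Int) (links : List (Int × Int)) (memo : List (Int × Int × Int)) : Prop :=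
  pvRes links num (PySem.Dict.mk memo) (2 * links.length + 1) node = true
instance (node : Int) (target : Int) (num : List Int) (links : List (Int × Int)) (memo : List (Int × Int × Int)) : Decidable (Pre_search node target num links memo) := by unfold Pre_search; infer_instance

def pvWitness_search : Int × Int × List Int × (List (Int × Int)) × (List (Int × Int × Int)) :=
  (1, 10, [1, 2], [(-1, -1), (0, -1)], [])

def Spec_search (node : Int) (target : Int) (num : List Int) (links : List (Int × Int)) (memo : List (Int × Int × Int)) (out : Int × Int) : Prop := out = search_alt node target num links memo
instance (node : Int) (target : Int) (num : List Int) (links : List (Int × Int)) (memo : List (Int × Int × Int)) (out : Int × Int) : Decidable (Spec_search node target num links memo out) := by unfold Spec_search; infer_instance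

-- ===== CLAIM =====
def Claim_equal_search : Prop := ∀ (node : Int) (target : Int) (num : List Int) (links : List (Int × Int)) (memo : List (Int × Int × Int)), Dom_search node target num links memo → Pre_search node target num links memo → Spec_search node target num links memo (search node target num links memo)

-- ===== LEMMAS AND PROOFS =====

-- the value both programs associate to a node: (0,0) for -1, the initial memo entry if present,
-- else the cascade on the children's values (fuel-indexed; stable once fuel covers pvRes depth)
def pvVal (target : Int) (num : List Int) (links : List (Int × Int)) (memo0 : PySem.Dict Int (Int × Int)) :
    Nat → Int → Int × Int
  | 0, _ => (0, 0)
  | Nat.succ fuel, i =>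
    if i = -1 then (0, 0)
    else match PySem.Dict.get? memo0 i with
    | some v => v
    | none =>
      match PySem.List.pyGet? links i with
      | none => (0, 0)
      | some lr =>
        pvCombine target (pvVal target num links memo0 fuel lr.1) (pvVal target num links memo0 fuel lr.2)
          ((PySem.List.pyGet? num i).getD 0)

def pvV (target : Int) (num : List Int) (links : List (Int × Int)) (memo0 : PySem.Dict Int (Int × Int)) (i : Int) : Int × Int :=
  pvVal target num links memo0 (2 * links.length + 1) i

-- a dynamic memo state is good: every non-(-1) entry carries the node's value, and keys absent
-- from it were absent initially
def pvGood (target : Int) (num : List Int) (links : List (Int × Int)) (memo0 m : PySem.Dict Int (Int × Int)) : Prop :=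
  (∀ k v, k ≠ -1 → PySem.Dict.get? m k = some v → v = pvV target num links memo0 k) ∧
  (∀ k, PySem.Dict.get? m k = none → PySem.Dict.get? memo0 k = none)

lemma pvVal_succ (target : Int) (num : List Int) (links : List (Int × Int)) (memo0 : PySem.Dict Int (Int × Int))
    (fuel : Nat) (i : Int) :
    pvVal target num links memo0 (fuel + 1) i =
      (if i = -1 then (0, 0)
       else match PySem.Dict.get? memo0 i with
       | some v => v
       | none =>
         match PySem.List.pyGet? links i with
         | none => (0, 0)
         | some lr =>
           pvCombine target (pvVal target num links memo0 fuel lr.1) (pvVal target num links memo0 fuel lr.2)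
             ((PySem.List.pyGet? num i).getD 0)) := rfl

lemma pvRes_succ (links : List (Int × Int)) (num : List Int) (memo0 : PySem.Dict Int (Int × Int))
    (h : Nat) (i : Int) :
    pvRes links num memo0 (h + 1) i =
      (if i = -1 then true
       else if (PySem.Dict.get? memo0 i).isSome then true
       else
         match PySem.List.pyGet? links i, PySem.List.pyGet? num i with
         | some lr, some _ => pvRes links num memo0 h lr.1 && pvRes links num memo0 h lr.2
         | _, _ => false) := rfl

lemma pvVal_neg_one (target : Int) (num : List Int) (links : List (Int × Int)) (memo0 : PySem.Dict Int (Int × Int))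
    (fuel : Nat) (h : 1 ≤ fuel) : pvVal target num links memo0 fuel (-1) = (0, 0) := by
  obtain ⟨f, rfl⟩ : ∃ f, fuel = f + 1 := ⟨fuel - 1, by omega⟩
  simp [pvVal_succ]

lemma pvV_neg_one (target : Int) (num : List Int) (links : List (Int × Int)) (memo0 : PySem.Dict Int (Int × Int)) :
    pvV target num links memo0 (-1) = (0, 0) :=
  pvVal_neg_one _ _ _ _ _ (by omega)

lemma pvV_memo0 (target : Int) (num : List Int) (links : List (Int × Int)) (memo0 : PySem.Dict Int (Int × Int))
    (k : Int) (v : Int × Int) (hk : k ≠ -1) (h : PySem.Dict.get? memo0 k = some v) :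
    pvV target num links memo0 k = v := by
  have : 2 * links.length + 1 = (2 * links.length) + 1 := rfl
  rw [pvV, this, pvVal_succ, if_neg hk, h]

-- the resolvability condition of a node forces its pvRes shape when it misses memo0
lemma pvRes_elim (links : List (Int × Int)) (num : List Int) (memo0 : PySem.Dict Int (Int × Int))
    (h : Nat) (i : Int) (hres : pvRes links num memo0 (h + 1) i = true) (h1 : i ≠ -1)
    (hm : PySem.Dict.get? memo0 i = none) :
    ∃ lr nv, PySem.List.pyGet? links i = some lr ∧ PySem.List.pyGet? num i = some nv ∧
      pvRes links num memo0 h lr.1 = true ∧ pvRes links num memo0 h lr.2 = true := by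
  rw [pvRes_succ, if_neg h1, hm] at hres
  simp only [Option.isSome_none, Bool.false_eq_true, if_false] at hres
  cases hl : PySem.List.pyGet? links i with
  | none => rw [hl] at hres; cases hn : PySem.List.pyGet? num i <;> rw [hn] at hres <;> simp at hres
  | some lr =>
    cases hn : PySem.List.pyGet? num i with
    | none => rw [hl, hn] at hres; simp at hres
    | some nv =>
      rw [hl, hn, Bool.and_eq_true] at hres
      exact ⟨lr, nv, rfl, rfl, hres.1, hres.2⟩

lemma pvVal_agree (target : Int) (num : List Int) (links : List (Int × Int)) (memo0 : PySem.Dict Int (Int × Int)) :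
    ∀ h i f f', pvRes links num memo0 h i = true → h ≤ f → h ≤ f' →
      pvVal target num links memo0 f i = pvVal target num links memo0 f' i := by
  intro h
  induction h with
  | zero => intro i f f' hres; simp [pvRes] at hres
  | succ h IH =>
    intro i f f' hres hf hf'
    obtain ⟨a, rfl⟩ : ∃ a, f = a + 1 := ⟨f - 1, by omega⟩
    obtain ⟨b, rfl⟩ : ∃ b, f' = b + 1 := ⟨f' - 1, by omega⟩
    by_cases h1 : i = -1
    · subst h1; simp [pvVal_succ]
    · rw [pvVal_succ, pvVal_succ, if_neg h1, if_neg h1]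
      cases hm : PySem.Dict.get? memo0 i with
      | some v => rfl
      | none =>
        obtain ⟨lr, nv, hl, hn, hres1, hres2⟩ := pvRes_elim links num memo0 h i hres h1 hm
        simp only [hl, IH lr.1 a b hres1 (by omega) (by omega), IH lr.2 a b hres2 (by omega) (by omega)]

lemma pvV_combine (target : Int) (num : List Int) (links : List (Int × Int)) (memo0 : PySem.Dict Int (Int × Int))
    (h : Nat) (i : Int) (lr : Int × Int)
    (hres : pvRes links num memo0 (h + 1) i = true) (hh : h + 1 ≤ 2 * links.length + 1)
    (h1 : i ≠ -1) (hm : PySem.Dict.get? memo0 i = none) (hl : PySem.List.pyGet? links i = some lr) :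
    pvV target num links memo0 i =
      pvCombine target (pvV target num links memo0 lr.1) (pvV target num links memo0 lr.2)
        ((PySem.List.pyGet? num i).getD 0) := by
  obtain ⟨lr', nv, hl', hn', hres1, hres2⟩ := pvRes_elim links num memo0 h i hres h1 hm
  rw [hl] at hl'; cases hl'
  have : (2 * links.length + 1 : Nat) = (2 * links.length) + 1 := rfl
  rw [pvV, this, pvVal_succ, if_neg h1]
  simp only [hm, hl,
    pvVal_agree target num links memo0 h lr.1 (2 * links.length) (2 * links.length + 1) hres1 (by omega) (by omega),
    pvVal_agree target num links memo0 h lr.2 (2 * links.length) (2 * links.length + 1) hres2 (by omega) (by omega)]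
  rfl

-- preservation of goodness by inserting a node's own value
lemma pvGood_insert (target : Int) (num : List Int) (links : List (Int × Int)) (memo0 m : PySem.Dict Int (Int × Int))
    (i : Int) (h1 : i ≠ -1) (hg : pvGood target num links memo0 m) :
    pvGood target num links memo0 (PySem.Dict.insert m i (pvV target num links memo0 i)) := by
  constructor
  · intro k v hk hkv
    rw [PySem.Dict.get?_insert] at hkv
    by_cases hki : k = i
    · subst hki; rw [if_pos rfl] at hkv; cases hkv; rfl
    · exact hg.1 k v hk (by rwa [if_neg hki] at hkv)
  · intro k hk
    rw [PySem.Dict.get?_insert] at hk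
    by_cases hki : k = i
    · subst hki; rw [if_pos rfl] at hk; simp at hk
    · exact hg.2 k (by rwa [if_neg hki] at hk)

-- ===== A-side main lemma: the recursive DFS returns pvV and keeps the memo good =====
lemma searchRec_pv (target : Int) (num : List Int) (links : List (Int × Int)) (memo0 : PySem.Dict Int (Int × Int)) :
    ∀ h, h ≤ 2 * links.length + 1 → ∀ i fuel m, pvRes links num memo0 h i = true → h ≤ fuel →
      pvGood target num links memo0 m →
      (searchRec target num links fuel i m).1 = pvV target num links memo0 i ∧
      pvGood target num links memo0 (searchRec target num links fuel i m).2 ∧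
      (∀ k v, PySem.Dict.get? m k = some v → PySem.Dict.get? (searchRec target num links fuel i m).2 k = some v) := by
  intro h
  induction h with
  | zero => intro _ i fuel m hres; simp [pvRes] at hres
  | succ h IH =>
    intro hh i fuel m hres hf hg
    obtain ⟨f, rfl⟩ : ∃ f, fuel = f + 1 := ⟨fuel - 1, by omega⟩
    by_cases h1 : i = -1
    · subst h1
      simp only [searchRec]
      exact ⟨(pvV_neg_one target num links memo0).symm, hg, fun k v hv => hv⟩
    · cases hmi : PySem.Dict.get? m i with
      | some v =>
        simp only [searchRec, if_neg h1, hmi]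
        exact ⟨hg.1 i v h1 hmi, hg, fun k v hv => hv⟩
      | none =>
        have hm0 : PySem.Dict.get? memo0 i = none := hg.2 i hmi
        obtain ⟨lr, nv, hl, hn, hres1, hres2⟩ := pvRes_elim links num memo0 h i hres h1 hm0
        obtain ⟨IHa1, IHa2, IHa3⟩ := IH (by omega) lr.1 f m hres1 (by omega) hg
        obtain ⟨IHb1, IHb2, IHb3⟩ :=
          IH (by omega) lr.2 f (searchRec target num links f lr.1 m).2 hres2 (by omega) IHa2
        have hval : pvCombine target (searchRec target num links f lr.1 m).1
            (searchRec target num links f lr.2 (searchRec target num links f lr.1 m).2).1 nv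
            = pvV target num links memo0 i := by
          rw [IHa1, IHb1, pvV_combine target num links memo0 h i lr hres (by omega) h1 hm0 hl, hn]
          rfl
        simp only [searchRec, if_neg h1, hmi, hl, hn]
        refine ⟨hval, ?_, ?_⟩
        · have := pvGood_insert target num links memo0
            (searchRec target num links f lr.2 (searchRec target num links f lr.1 m).2).2 i h1 IHb2
          rwa [hval]
        · intro k v hkv
          rw [PySem.Dict.get?_insert]
          by_cases hki : k = i
          · subst hki; rw [hmi] at hkv; cases hkv
          · rw [if_neg hki]; exact IHb3 k v (IHa3 k v hkv)

lemma loopB_nil (target : Int) (num : List Int) (links : List (Int × Int)) (f : Nat)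
    (m : PySem.Dict Int (Int × Int)) : loopB target num links f [] m = m := by
  cases f <;> rfl

-- ===== B-side main lemma: processing one (x, false) frame resolves x and keeps the memo good =====
lemma loopB_pv (target : Int) (num : List Int) (links : List (Int × Int)) (memo0 : PySem.Dict Int (Int × Int)) :
    ∀ h, h ≤ 2 * links.length + 1 → ∀ x m, pvRes links num memo0 h x = true →
      pvGood target num links memo0 m →
      ∃ (c : Nat) (m' : PySem.Dict Int (Int × Int)), 1 ≤ c ∧ c + 2 ≤ 2 ^ (h + 2) ∧
        (∀ rest f, c ≤ f →
          loopB target num links f ((x, false) :: rest) m = loopB target num links (f - c) rest m') ∧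
        pvGood target num links memo0 m' ∧
        (∀ k v, PySem.Dict.get? m k = some v → PySem.Dict.get? m' k = some v) ∧
        (x = -1 ∨ PySem.Dict.get? m' x = some (pvV target num links memo0 x)) := by
  intro h
  induction h with
  | zero => intro _ x m hres; simp [pvRes] at hres
  | succ h IH =>
    intro hh x m hres hg
    have hpow : 4 ≤ 2 ^ (h + 1 + 2) := by
      calc (4 : Nat) = 2 ^ 2 := rfl
        _ ≤ 2 ^ (h + 1 + 2) := Nat.pow_le_pow_right (by omega) (by omega)
    by_cases h1 : x = -1
    · subst h1
      refine ⟨1, m, le_refl 1, by omega, ?_, hg, fun k v hv => hv, Or.inl rfl⟩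
      intro rest f hf
      obtain ⟨g, rfl⟩ : ∃ g, f = g + 1 := ⟨f - 1, by omega⟩
      simp [loopB]
    · cases hmx : PySem.Dict.get? m x with
      | some v =>
        refine ⟨1, m, le_refl 1, by omega, ?_, hg, fun k v hv => hv,
          Or.inr (by rw [hmx, hg.1 x v h1 hmx])⟩
        intro rest f hf
        obtain ⟨g, rfl⟩ : ∃ g, f = g + 1 := ⟨f - 1, by omega⟩
        simp [loopB, h1, hmx]
      | none =>
        have hm0 : PySem.Dict.get? memo0 x = none := hg.2 x hmx
        obtain ⟨lr, nv, hl, hn, hres1, hres2⟩ := pvRes_elim links num memo0 h x hres h1 hm0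
        obtain ⟨c1, m1, hc11, hc12, heq1, hg1, hext1, hval1⟩ := IH (by omega) lr.1 m hres1 hg
        obtain ⟨c2, m2, hc21, hc22, heq2, hg2, hext2, hval2⟩ := IH (by omega) lr.2 m1 hres2 hg1
        have hpow2 : 2 ^ (h + 1 + 2) = 2 * 2 ^ (h + 2) := by rw [pow_succ]; ring
        -- the children's values are available in m2
        have hlp : (if lr.1 = -1 then ((0 : Int), (0 : Int)) else (PySem.Dict.get? m2 lr.1).getD (0, 0))
            = pvV target num links memo0 lr.1 := by
          by_cases hz : lr.1 = -1
          · rw [if_pos hz, hz, pvV_neg_one]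
          · rcases hval1 with h' | h'
            · exact absurd h' hz
            · rw [if_neg hz, hext2 _ _ h', Option.getD_some]
        have hrp : (if lr.2 = -1 then ((0 : Int), (0 : Int)) else (PySem.Dict.get? m2 lr.2).getD (0, 0))
            = pvV target num links memo0 lr.2 := by
          by_cases hz : lr.2 = -1
          · rw [if_pos hz, hz, pvV_neg_one]
          · rcases hval2 with h' | h'
            · exact absurd h' hz
            · rw [if_neg hz, h', Option.getD_some]
        have hcomb : pvCombine target
            (if lr.1 = -1 then ((0 : Int), (0 : Int)) else (PySem.Dict.get? m2 lr.1).getD (0, 0))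
            (if lr.2 = -1 then ((0 : Int), (0 : Int)) else (PySem.Dict.get? m2 lr.2).getD (0, 0))
            ((PySem.List.pyGet? num x).getD 0) = pvV target num links memo0 x := by
          rw [hlp, hrp, pvV_combine target num links memo0 h x lr hres (by omega) h1 hm0 hl]
        -- the final (x, true) frame either finds x already resolved or inserts its value
        cases hm2x : PySem.Dict.get? m2 x with
        | some w =>
          refine ⟨c1 + c2 + 2, m2, by omega, by omega, ?_, hg2, ?_, Or.inr ?_⟩
          · intro rest f hf
            obtain ⟨g, rfl⟩ : ∃ g, f = g + 1 := ⟨f - 1, by omega⟩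
            have step1 : loopB target num links (g + 1) ((x, false) :: rest) m
                = loopB target num links g ((lr.1, false) :: (lr.2, false) :: (x, true) :: rest) m := by
              simp [loopB, h1, hmx, hl]
            rw [step1, heq1 _ g (by omega), heq2 _ (g - c1) (by omega)]
            obtain ⟨e, he⟩ : ∃ e, g - c1 - c2 = e + 1 := ⟨g - c1 - c2 - 1, by omega⟩
            rw [he]
            simp only [loopB, if_neg h1]
            simp [hm2x]
            congr 1
            omega
          · exact fun k v hv => hext2 k v (hext1 k v hv)
          · rw [hm2x, hg2.1 x w h1 hm2x]
        | none =>
          refine ⟨c1 + c2 + 2,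
            PySem.Dict.insert m2 x (pvV target num links memo0 x), by omega, by omega, ?_, ?_, ?_, Or.inr ?_⟩
          · intro rest f hf
            obtain ⟨g, rfl⟩ : ∃ g, f = g + 1 := ⟨f - 1, by omega⟩
            have step1 : loopB target num links (g + 1) ((x, false) :: rest) m
                = loopB target num links g ((lr.1, false) :: (lr.2, false) :: (x, true) :: rest) m := by
              simp [loopB, h1, hmx, hl]
            rw [step1, heq1 _ g (by omega), heq2 _ (g - c1) (by omega)]
            obtain ⟨e, he⟩ : ∃ e, g - c1 - c2 = e + 1 := ⟨g - c1 - c2 - 1, by omega⟩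
            rw [he]
            simp only [loopB, if_neg h1]
            simp [hm2x, hl, hcomb]
            congr 1
            omega
          · exact pvGood_insert target num links memo0 m2 x h1 hg2
          · intro k v hkv
            rw [PySem.Dict.get?_insert]
            by_cases hki : k = x
            · subst hki; rw [hmx] at hkv; cases hkv
            · rw [if_neg hki]; exact hext2 k v (hext1 k v hkv)
          · rw [PySem.Dict.get?_insert, if_pos rfl]

-- ===== VERDICT =====
theorem search_spec : Claim_equal_search := by
  intro node target num links memo _hdom hpre
  unfold Spec_search search search_alt
  by_cases h1 : node = -1
  · subst h1
    rw [show 2 * links.length + 2 = (2 * links.length + 1) + 1 from rfl]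
    simp [searchRec]
  · rw [if_neg h1]
    cases hd : PySem.Dict.get? (PySem.Dict.mk memo) node with
    | some v =>
      rw [show 2 * links.length + 2 = (2 * links.length + 1) + 1 from rfl]
      simp only [searchRec, if_neg h1, hd]
    | none =>
      unfold Pre_search at hpre
      have hg0 : pvGood target num links (PySem.Dict.mk memo) (PySem.Dict.mk memo) :=
        ⟨fun k v hk hkv => (pvV_memo0 target num links (PySem.Dict.mk memo) k v hk hkv).symm,
         fun k hk => hk⟩
      obtain ⟨hA, -, -⟩ := searchRec_pv target num links (PySem.Dict.mk memo)
        (2 * links.length + 1) (le_refl _) node (2 * links.length + 2) (PySem.Dict.mk memo)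
        hpre (by omega) hg0
      obtain ⟨c, m', hc1, hc2, heq, -, -, hval⟩ := loopB_pv target num links (PySem.Dict.mk memo)
        (2 * links.length + 1) (le_refl _) node (PySem.Dict.mk memo) hpre hg0
      have hpe : 2 * links.length + 1 + 2 = 2 * links.length + 3 := by omega
      rw [hpe] at hc2
      rw [hA]
      simp only [hd]
      rw [heq [] (2 ^ (2 * links.length + 3)) (by omega), loopB_nil]
      rcases hval with h' | h'
      · exact absurd h' h1
      · rw [h', Option.getD_some]
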